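-- pv_equiv track=rewrite | github.com/rustamabdukakhorov/Robocontest | 471.py | satr
-- ===== SOURCE A (Python) =====
-- def satr(s):
--     x = []
--     for i in range(len(s)-1):
--         x.append(abs(ord(s[i]) - ord(s[i+1])))
--     if x == x[::-1]:
--         return 'Ajoyib satr'
--     else:
--         return 'Oddiy satr'
-- ===== SOURCE B (Python) =====
-- def _diff(s, k):
--     return abs(ord(s[k]) - ord(s[k + 1]))
--
-- def satr(s):
--     i, j = 0, len(s) - 2
--     while i < j:
--         if _diff(s, i) != _diff(s, j):
--             return 'Oddiy satr'
--         i += 1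
--         j -= 1
--     return 'Ajoyib satr'
-- ===== Notes on version B (the rewrite author's own statement) =====
-- stated objective: simpler
-- what changed: B replaces building the whole difference list and comparing it with its reversal by a two-pointer inward scan over the string that compares mirror-position differences directly and stops at the first mismatch, using O(1) extra space.
import Mathlib
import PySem

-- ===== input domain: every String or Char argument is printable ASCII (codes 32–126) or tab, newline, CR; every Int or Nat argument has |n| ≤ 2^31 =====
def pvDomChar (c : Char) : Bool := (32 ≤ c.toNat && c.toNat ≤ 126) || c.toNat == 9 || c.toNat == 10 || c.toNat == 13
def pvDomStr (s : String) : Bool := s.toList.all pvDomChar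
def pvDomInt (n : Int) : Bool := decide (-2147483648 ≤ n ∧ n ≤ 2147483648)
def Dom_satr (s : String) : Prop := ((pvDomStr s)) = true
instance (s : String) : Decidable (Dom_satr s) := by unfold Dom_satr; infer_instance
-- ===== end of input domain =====

-- B replaces the difference-list + reversal comparison by a two-pointer inward scan (simpler, O(1) extra space); return values proved equal for all inputs.


-- ===== PORT A =====
-- x = []; for i in range(len(s)-1): x.append(abs(ord(s[i]) - ord(s[i+1]))); return on x == x[::-1]
def satr (s : String) : String :=
  let cs := s.toList
  let x : List Int :=
    (PySem.List.pyRange 0 (PySem.Str.len s - 1) 1).foldl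
      (fun x i =>
        x ++ [|((PySem.List.pyGetD cs i ' ').toNat : Int)
               - ((PySem.List.pyGetD cs (i + 1) ' ').toNat : Int)|]) []
  if PySem.List.slice? x none none (-1) = some x then "Ajoyib satr" else "Oddiy satr"

-- ===== PORT B =====
-- abs(ord(s[k]) - ord(s[k+1])); indices are always in range when called by the loop
def diffAt (cs : List Char) (k : Nat) : Int :=
  |((cs.getD k ' ').toNat : Int) - ((cs.getD (k + 1) ' ').toNat : Int)|

-- while i < j: compare mirror differences, move both pointers inward
def satrLoop (cs : List Char) (i j : Nat) : String :=
  if _h : i < j then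
    if diffAt cs i ≠ diffAt cs j then "Oddiy satr"
    else satrLoop cs (i + 1) (j - 1)
  else "Ajoyib satr"
termination_by j - i

def satr_alt (s : String) : String :=
  satrLoop s.toList 0 (s.toList.length - 2)

-- ===== PRECONDITION & SPEC =====
def Spec_satr (s : String) (out : String) : Prop := out = satr_alt s
instance (s : String) (out : String) : Decidable (Spec_satr s out) := by unfold Spec_satr; infer_instance

-- ===== CLAIM (what is proved, stated in full; the proofs are below) =====
def Claim_equal_satr : Prop := ∀ (s : String), Dom_satr s → Spec_satr s (satr s)

-- ===== LEMMAS AND PROOFS =====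

-- the two-pointer loop returns 'Ajoyib satr' iff every in-window position agrees with its mirror
theorem satrLoop_eq_iff (cs : List Char) (i j : Nat) :
    satrLoop cs i j = "Ajoyib satr" ↔
      ∀ k, i ≤ k → k < j → diffAt cs k = diffAt cs (i + j - k) := by
  induction i, j using satrLoop.induct cs with
  | case1 i j h hne =>
      rw [satrLoop]
      simp only [dif_pos h, if_pos hne]
      constructor
      · intro hcontra; exact absurd hcontra (by decide)
      · intro hall
        exact absurd (by have := hall i le_rfl h; simpa using this) hne
  | case2 i j h hne ih =>
      rw [satrLoop]
      simp only [dif_pos h, if_neg hne]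
      rw [ih]
      constructor
      · intro hall k hk1 hk2
        rcases Nat.eq_or_lt_of_le hk1 with rfl | hk1'
        · have hsimp : i + j - i = j := by omega
          rw [hsimp]
          simpa using hne
        · by_cases hk3 : k < j - 1
          · have := hall k hk1' hk3
            rwa [show i + 1 + (j - 1) - k = i + j - k by omega] at this
          · have hkj : k = j - 1 := by omega
            subst hkj
            rw [show i + j - (j - 1) = i + 1 by omega]
            by_cases hmid : i + 1 < j - 1
            · have := hall (i + 1) le_rfl hmid
              rw [show i + 1 + (j - 1) - (i + 1) = j - 1 by omega] at this
              exact this.symm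
            · rw [show j - 1 = i + 1 by omega]
      · intro hall k hk1 hk2
        have := hall k (by omega) (by omega)
        rwa [show i + j - k = i + 1 + (j - 1) - k by omega] at this
  | case3 i j h =>
      rw [satrLoop]
      simp only [dif_neg h, true_iff]
      intro k hk1 hk2
      exact absurd (lt_of_le_of_lt hk1 hk2) h

-- A's loop builds exactly the list of adjacent differences
theorem satr_x_eq (s : String) :
    (PySem.List.pyRange 0 (PySem.Str.len s - 1) 1).foldl
      (fun x i =>
        x ++ [|((PySem.List.pyGetD s.toList i ' ').toNat : Int)
               - ((PySem.List.pyGetD s.toList (i + 1) ' ').toNat : Int)|]) []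
      = (List.range (s.toList.length - 1)).map (diffAt s.toList) := by
  rw [PySem.List.foldl_append_singleton_eq_map, PySem.List.pyRange_one, List.map_map]
  have hlen : ((PySem.Str.len s - 1) - 0).toNat = s.toList.length - 1 := by
    simp only [PySem.Str.len_eq, Int.sub_zero]
    omega
  rw [hlen]
  apply List.map_congr_left
  intro k hk
  simp only [Function.comp_apply, zero_add, diffAt]
  have h1 : ((k : Int) + 1) = ((k + 1 : Nat) : Int) := by push_cast; ring
  rw [h1, PySem.List.pyGetD_natCast, PySem.List.pyGetD_natCast]

-- a list equals its reverse iff every element agrees with its mirror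
theorem reverse_eq_iff_mirror {α : Type} (f : Nat → α) (m : Nat) :
    ((List.range m).map f).reverse = (List.range m).map f ↔
      ∀ k, k < m → f k = f (m - 1 - k) := by
  constructor
  · intro hrev k hk
    have hklt : k < ((List.range m).map f).reverse.length := by simpa using hk
    have h1 := List.getElem_of_eq hrev hklt
    rw [List.getElem_reverse] at h1
    simp only [List.length_map, List.length_range, List.getElem_map, List.getElem_range] at h1
    exact h1.symm
  · intro hall
    apply List.ext_getElem (by simp)
    intro k h1 h2
    rw [List.getElem_reverse]
    simp only [List.length_map, List.length_range, List.getElem_map, List.getElem_range]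
    have hk : k < m := by simpa using h2
    exact (hall k hk).symm

-- ===== VERDICT (by name: the statement is the Claim_ definition above) =====
theorem satr_spec : Claim_equal_satr := by
  intro s _
  unfold Spec_satr satr satr_alt
  simp only []
  rw [satr_x_eq, PySem.List.slice?_none_none_neg_one]
  set cs := s.toList with hcs
  set m := cs.length - 1 with hm
  have hB := satrLoop_eq_iff cs 0 (cs.length - 2)
  by_cases hA : ((List.range m).map (diffAt cs)).reverse = (List.range m).map (diffAt cs)
  · rw [if_pos (by rw [hA])]
    rw [reverse_eq_iff_mirror (diffAt cs) m] at hA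
    have hok : satrLoop cs 0 (cs.length - 2) = "Ajoyib satr" := by
      rw [hB]
      intro k _ hk2
      have := hA k (by omega)
      rw [this]
      congr 1
      omega
    rw [hok]
  · rw [if_neg (fun hcon => hA (Option.some.inj hcon))]
    rw [reverse_eq_iff_mirror] at hA
    push_neg at hA
    obtain ⟨k, hk, hne⟩ := hA
    have hloop : satrLoop cs 0 (cs.length - 2) ≠ "Ajoyib satr" := by
      intro hcon
      rw [hB] at hcon
      apply hne
      by_cases hkm : k < cs.length - 2
      · have := hcon k (Nat.zero_le _) hkm
        rwa [show 0 + (cs.length - 2) - k = m - 1 - k by omega] at this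
      · have hk0 : k = cs.length - 2 := by omega
        by_cases h2 : 0 < cs.length - 2
        · have := hcon 0 (Nat.zero_le _) h2
          rw [show 0 + (cs.length - 2) - 0 = cs.length - 2 by omega] at this
          rw [show m - 1 - k = 0 by omega, hk0]
          exact this.symm
        · rw [show m - 1 - k = k by omega]
    -- the loop returns either 'Ajoyib satr' or 'Oddiy satr'
    have honly : ∀ i j, satrLoop cs i j = "Ajoyib satr" ∨ satrLoop cs i j = "Oddiy satr" := by
      intro i j
      induction i, j using satrLoop.induct cs with
      | case1 i j h hne => rw [satrLoop]; simp [dif_pos h, if_pos hne]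
      | case2 i j h hne ih => rw [satrLoop]; simpa [dif_pos h, if_neg hne] using ih
      | case3 i j h => rw [satrLoop]; simp [dif_neg h]
    rcases honly 0 (cs.length - 2) with h | h
    · exact absurd h hloop
    · rw [h]
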